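-- pv_equiv track=rewrite | github.com/N0ZA/Line-Following-with-Object-Pickup | main.py | simulate_coordinates
-- ===== SOURCE A (Python) =====
-- DIRECTIONS = ['N', 'E', 'S', 'W']
--
-- def update_direction(current_dir, turn):
--     idx = DIRECTIONS.index(current_dir)
--     if turn == 'L':
--         new_idx = (idx - 1) % 4
--     else:
--         new_idx = (idx + 1) % 4
--     return DIRECTIONS[new_idx]
--
-- def simulate_coordinates(start_x, start_y, start_dir, commands):
--     coords = [(start_x, start_y)]
--     current_x, current_y, current_dir = start_x, start_y, start_dir
--     for cmd in commands:
--         if cmd == 'F':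
--             if current_dir == 'N':
--                 current_y += 1
--             elif current_dir == 'E':
--                 current_x += 1
--             elif current_dir == 'S':
--                 current_y -= 1
--             elif current_dir == 'W':
--                 current_x -= 1
--             coords.append((current_x, current_y))
--         elif cmd in ['L', 'R']:
--             current_dir = update_direction(current_dir, cmd)
--         elif cmd == 'U':  # Add U-turn handling
--             current_dir = update_direction(current_dir, 'R')
--             current_dir = update_direction(current_dir, 'R')
--     return coords
-- ===== SOURCE B (Python) =====
-- DIR_VECTORS = {'N': (0, 1), 'E': (1, 0), 'S': (0, -1), 'W': (-1, 0)}
--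
-- def simulate_coordinates(start_x, start_y, start_dir, commands):
--     # Pass 1: turn the command stream into a list of movement deltas,
--     # tracking the heading as a unit vector rotated in place.
--     dx, dy = DIR_VECTORS.get(start_dir, (0, 0))  # unknown heading: stay put
--     deltas = []
--     for cmd in commands:
--         if cmd == 'F':
--             deltas.append((dx, dy))
--         elif cmd == 'L':
--             dx, dy = -dy, dx
--         elif cmd == 'R':
--             dx, dy = dy, -dx
--         elif cmd == 'U':
--             dx, dy = -dx, -dy
--     # Pass 2: prefix-sum the deltas into the coordinate trace.
--     coords = [(start_x, start_y)]
--     for ddx, ddy in deltas: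
--         px, py = coords[-1]
--         coords.append((px + ddx, py + ddy))
--     return coords
-- ===== Notes on version B (the rewrite author's own statement) =====
-- stated objective: simpler
-- what changed: Replaces the compass-letter state machine (string direction updated via DIRECTIONS.index and a 4-way elif per step) by a heading vector (dx,dy) rotated with sign swaps, and splits the work into two passes: commands -> movement deltas, then a prefix-sum of the deltas into coordinates.
import Mathlib
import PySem

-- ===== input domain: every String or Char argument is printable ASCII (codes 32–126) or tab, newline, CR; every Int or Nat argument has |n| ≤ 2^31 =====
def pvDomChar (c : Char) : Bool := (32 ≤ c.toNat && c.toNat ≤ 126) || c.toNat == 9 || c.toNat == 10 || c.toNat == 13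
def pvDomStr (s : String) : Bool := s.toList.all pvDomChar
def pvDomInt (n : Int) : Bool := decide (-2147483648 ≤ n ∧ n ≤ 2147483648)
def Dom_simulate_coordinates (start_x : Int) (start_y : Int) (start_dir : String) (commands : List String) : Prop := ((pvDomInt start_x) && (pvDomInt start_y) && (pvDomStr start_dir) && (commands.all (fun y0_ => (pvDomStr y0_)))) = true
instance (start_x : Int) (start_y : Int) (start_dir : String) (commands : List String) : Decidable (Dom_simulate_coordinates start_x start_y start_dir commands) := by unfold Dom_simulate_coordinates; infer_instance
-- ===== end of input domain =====

-- B replaces A's compass-letter state machine by a heading vector rotated with sign swaps,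
-- and computes the trace in two passes (commands -> deltas, then a prefix sum); objective: simpler.

-- ===== PORT A =====
def pyDIRECTIONS : List String := ["N", "E", "S", "W"]

-- A's update_direction; 'none' = the ValueError of DIRECTIONS.index (excluded by Pre_).
def update_direction (current_dir : String) (turn : String) : Option String :=
  match PySem.List.index? pyDIRECTIONS current_dir with
  | none => none
  | some idx =>
      let new_idx : Int :=
        if turn = "L" then PySem.Int.mod ((idx : Int) - 1) 4
        else PySem.Int.mod ((idx : Int) + 1) 4
      PySem.List.pyGet? pyDIRECTIONS new_idx

-- one iteration of A's for-loop over commands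
def aStep (st : List (Int × Int) × Int × Int × String) (cmd : String) :
    List (Int × Int) × Int × Int × String :=
  let (coords, x, y, dir) := st
  if cmd = "F" then
    let (x', y') :=
      if dir = "N" then (x, y + 1)
      else if dir = "E" then (x + 1, y)
      else if dir = "S" then (x, y - 1)
      else if dir = "W" then (x - 1, y)
      else (x, y)
    (coords ++ [(x', y')], x', y', dir)
  else if cmd = "L" ∨ cmd = "R" then
    -- .getD dir only covers the ValueError case, excluded by Pre_
    (coords, x, y, (update_direction dir cmd).getD dir)
  else if cmd = "U" then
    (coords, x, y,
      (update_direction ((update_direction dir "R").getD dir) "R").getD dir)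
  else
    (coords, x, y, dir)

def simulate_coordinates (start_x : Int) (start_y : Int) (start_dir : String) (commands : List String) : List (Int × Int) :=
  (commands.foldl aStep ([(start_x, start_y)], start_x, start_y, start_dir)).1

-- ===== PORT B =====
def DIR_VECTORS : PySem.Dict String (Int × Int) :=
  PySem.Dict.ofList [("N", (0, 1)), ("E", (1, 0)), ("S", (0, -1)), ("W", (-1, 0))]

-- pass 1 of Source B: one command -> updated (deltas, dx, dy)
def deltaStep (st : List (Int × Int) × Int × Int) (cmd : String) :
    List (Int × Int) × Int × Int :=
  let (ds, dx, dy) := st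
  if cmd = "F" then (ds ++ [(dx, dy)], dx, dy)
  else if cmd = "L" then (ds, -dy, dx)
  else if cmd = "R" then (ds, dy, -dx)
  else if cmd = "U" then (ds, -dx, -dy)
  else st

-- pass 2 of Source B: append coords[-1] + delta
def scanStep (coords : List (Int × Int)) (d : Int × Int) : List (Int × Int) :=
  let p := (PySem.List.pyGetD coords (-1) (0, 0))  -- coords[-1]; coords is never empty
  coords ++ [(p.1 + d.1, p.2 + d.2)]

def simulate_coordinates_alt (start_x : Int) (start_y : Int) (start_dir : String) (commands : List String) : List (Int × Int) :=
  -- DIR_VECTORS.get(start_dir, (0, 0))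
  let v := (DIR_VECTORS.get? start_dir).getD (0, 0)
  let deltas := (commands.foldl deltaStep ([], v.1, v.2)).1
  deltas.foldl scanStep [(start_x, start_y)]

-- ===== PRECONDITION & SPEC =====
-- Pre_ excludes exactly the inputs where A raises: an invalid start_dir together with a turn
-- command ('L'/'R'/'U'), on which DIRECTIONS.index raises ValueError.
def Pre_simulate_coordinates (start_x : Int) (start_y : Int) (start_dir : String) (commands : List String) : Prop :=
  start_dir ∈ pyDIRECTIONS ∨ ∀ c ∈ commands, c ≠ "L" ∧ c ≠ "R" ∧ c ≠ "U"
instance (start_x : Int) (start_y : Int) (start_dir : String) (commands : List String) : Decidable (Pre_simulate_coordinates start_x start_y start_dir commands) := by unfold Pre_simulate_coordinates; infer_instance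

def pvWitness_simulate_coordinates : Int × Int × String × List String :=
  (0, 0, "N", ["F", "L", "F", "U", "F", "R", "F"])

def Spec_simulate_coordinates (start_x : Int) (start_y : Int) (start_dir : String) (commands : List String) (out : List (Int × Int)) : Prop := out = simulate_coordinates_alt start_x start_y start_dir commands
instance (start_x : Int) (start_y : Int) (start_dir : String) (commands : List String) (out : List (Int × Int)) : Decidable (Spec_simulate_coordinates start_x start_y start_dir commands out) := by unfold Spec_simulate_coordinates; infer_instance

-- ===== CLAIM (what is proved, stated in full; the proofs are below) =====
def Claim_equal_simulate_coordinates : Prop := ∀ (start_x : Int) (start_y : Int) (start_dir : String) (commands : List String), Dom_simulate_coordinates start_x start_y start_dir commands → Pre_simulate_coordinates start_x start_y start_dir commands → Spec_simulate_coordinates start_x start_y start_dir commands (simulate_coordinates start_x start_y start_dir commands)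

-- ===== LEMMAS AND PROOFS =====

-- heading vector of a valid compass letter (proof-side only)
def vec (dir : String) : Int × Int :=
  if dir = "N" then (0, 1)
  else if dir = "E" then (1, 0)
  else if dir = "S" then (0, -1)
  else (-1, 0)

-- fused one-pass version of B, the bridge between the two ports (proof-side only)
def fStep (st : List (Int × Int) × Int × Int × (Int × Int)) (cmd : String) :
    List (Int × Int) × Int × Int × (Int × Int) :=
  let (coords, x, y, v) := st
  if cmd = "F" then (coords ++ [(x + v.1, y + v.2)], x + v.1, y + v.2, v)
  else if cmd = "L" then (coords, x, y, (-v.2, v.1))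
  else if cmd = "R" then (coords, x, y, (v.2, -v.1))
  else if cmd = "U" then (coords, x, y, (-v.1, -v.2))
  else st

theorem upd_eq (d t : String) (hd : d ∈ pyDIRECTIONS) :
    update_direction d t = some (if t = "L"
      then (if d = "N" then "W" else if d = "E" then "N" else if d = "S" then "E" else "S")
      else (if d = "N" then "E" else if d = "E" then "S" else if d = "S" then "W" else "N")) := by
  fin_cases hd <;> by_cases h : t = "L" <;> simp only [update_direction, h] <;> decide

theorem upd_mem (d t : String) (hd : d ∈ pyDIRECTIONS) :
    (update_direction d t).getD d ∈ pyDIRECTIONS := by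
  rw [upd_eq d t hd]; fin_cases hd <;> by_cases h : t = "L" <;> simp [h] <;> decide

theorem vec_updL (d : String) (hd : d ∈ pyDIRECTIONS) :
    vec ((update_direction d "L").getD d) = (-(vec d).2, (vec d).1) := by
  rw [upd_eq d "L" hd]; fin_cases hd <;> decide

theorem vec_updR (d : String) (hd : d ∈ pyDIRECTIONS) :
    vec ((update_direction d "R").getD d) = ((vec d).2, -(vec d).1) := by
  rw [upd_eq d "R" hd]; fin_cases hd <;> decide

theorem move_eq (d : String) (hd : d ∈ pyDIRECTIONS) (x y : Int) :
    (if d = "N" then (x, y + 1)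
     else if d = "E" then (x + 1, y)
     else if d = "S" then (x, y - 1)
     else if d = "W" then (x - 1, y)
     else (x, y)) = (x + (vec d).1, y + (vec d).2) := by
  fin_cases hd <;> simp [vec, sub_eq_add_neg]

-- L1: A's fold equals the fused vector fold, as long as the direction is valid
theorem foldA_eq_foldF (cmds : List String) :
    ∀ (coords : List (Int × Int)) (x y : Int) (dir : String), dir ∈ pyDIRECTIONS →
    (cmds.foldl aStep (coords, x, y, dir)).1 =
    (cmds.foldl fStep (coords, x, y, vec dir)).1 := by
  induction cmds with
  | nil => intro coords x y dir _; rfl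
  | cons cmd rest ih =>
      intro coords x y dir hdir
      simp only [List.foldl_cons, aStep, fStep]
      by_cases hF : cmd = "F"
      · simp only [hF, String.reduceEq, reduceIte, move_eq dir hdir x y]
        norm_num
        exact ih _ _ _ _ hdir
      · by_cases hL : cmd = "L"
        · simp only [hL, show (("L":String) = "F") = False from by decide,
            show (("L":String) = "L") = True from by decide,
            show (("L":String) = "R") = False from by decide, true_or, if_true, if_false]
          rw [ih _ _ _ _ (upd_mem dir "L" hdir), vec_updL dir hdir]
        · by_cases hR : cmd = "R"
          · simp only [hR, show (("R":String) = "F") = False from by decide,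
              show (("R":String) = "L") = False from by decide,
              show (("R":String) = "R") = True from by decide, or_true, if_true, if_false]
            rw [ih _ _ _ _ (upd_mem dir "R" hdir), vec_updR dir hdir]
          · by_cases hU : cmd = "U"
            · simp only [hU, show (("U":String) = "F") = False from by decide,
                show (("U":String) = "L") = False from by decide,
                show (("U":String) = "R") = False from by decide,
                show (("U":String) = "U") = True from by decide, or_self, if_true, if_false]
              rw [show (update_direction ((update_direction dir "R").getD dir) "R").getD dir
                  = (update_direction ((update_direction dir "R").getD dir) "R").getD
                      ((update_direction dir "R").getD dir) from by
                    rw [upd_eq _ "R" (upd_mem dir "R" hdir)]; rfl]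
              rw [ih _ _ _ _ (upd_mem _ "R" (upd_mem dir "R" hdir)),
                vec_updR _ (upd_mem dir "R" hdir), vec_updR dir hdir]
            · simp only [if_neg hF, if_neg (show ¬(cmd = "L" ∨ cmd = "R") by simp [hL, hR]),
                if_neg hU, if_neg hL, if_neg hR]
              exact ih _ _ _ _ hdir

-- L2: the fused fold equals pass-2 applied to the deltas of pass-1
theorem foldF_eq_scan (cmds : List String) :
    ∀ (ds : List (Int × Int)) (coords : List (Int × Int)) (x y : Int) (v : Int × Int),
    PySem.List.pyGetD (ds.foldl scanStep coords) (-1) (0, 0) = (x, y) →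
    (cmds.foldl deltaStep (ds, v.1, v.2)).1.foldl scanStep coords =
    (cmds.foldl fStep (ds.foldl scanStep coords, x, y, v)).1 := by
  induction cmds with
  | nil => intro ds coords x y v _; rfl
  | cons cmd rest ih =>
      intro ds coords x y v hlast
      simp only [List.foldl_cons, deltaStep, fStep]
      by_cases hF : cmd = "F"
      · simp only [hF, reduceIte]
        have hfold : (ds ++ [(v.1, v.2)]).foldl scanStep coords =
            (ds.foldl scanStep coords) ++ [(x + v.1, y + v.2)] := by
          rw [List.foldl_append]
          simp only [List.foldl_cons, List.foldl_nil, scanStep, hlast]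
        refine (ih (ds ++ [(v.1, v.2)]) coords (x + v.1) (y + v.2) v ?_).trans ?_
        · rw [hfold]; exact PySem.List.pyGetD_neg_one_append_singleton ..
        · rw [hfold]
      · by_cases hL : cmd = "L"
        · simp only [hL, show (("L":String) = "F") = False from by decide,
            show (("L":String) = "L") = True from by decide,
            show (("L":String) = "R") = False from by decide, true_or, if_true, if_false]
          exact ih ds coords x y (-v.2, v.1) hlast
        · by_cases hR : cmd = "R"
          · simp only [hR, show (("R":String) = "F") = False from by decide,
              show (("R":String) = "L") = False from by decide,
              show (("R":String) = "R") = True from by decide, false_or, if_true, if_false]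
            exact ih ds coords x y (v.2, -v.1) hlast
          · by_cases hU : cmd = "U"
            · simp only [hU, String.reduceEq, reduceIte]
              exact ih ds coords x y (-v.1, -v.2) hlast
            · simp only [if_neg hF, if_neg hL, if_neg hR, if_neg hU]
              exact ih ds coords x y v hlast

-- A's heading vector as B reads it from the dict
theorem getD_DIR (dir : String) :
    (DIR_VECTORS.get? dir).getD (0, 0) = if dir ∈ pyDIRECTIONS then vec dir else (0, 0) := by
  by_cases h1 : dir = "N"
  · subst h1; decide
  · by_cases h2 : dir = "E"
    · subst h2; decide
    · by_cases h3 : dir = "S"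
      · subst h3; decide
      · by_cases h4 : dir = "W"
        · subst h4; decide
        · rw [if_neg (by simp [pyDIRECTIONS, h1, h2, h3, h4])]
          simp [DIR_VECTORS, PySem.Dict.ofList, PySem.Dict.update, PySem.Dict.get?_insert,
            PySem.Dict.get?_empty, h1, h2, h3, h4]

-- L1': on a turn-free command list an invalid direction never moves, like the zero vector
theorem foldA_eq_foldF_invalid (cmds : List String) :
    ∀ (coords : List (Int × Int)) (x y : Int) (dir : String), dir ∉ pyDIRECTIONS →
    (∀ c ∈ cmds, c ≠ "L" ∧ c ≠ "R" ∧ c ≠ "U") →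
    (cmds.foldl aStep (coords, x, y, dir)).1 =
    (cmds.foldl fStep (coords, x, y, ((0 : Int), (0 : Int)))).1 := by
  induction cmds with
  | nil => intro coords x y dir _ _; rfl
  | cons cmd rest ih =>
      intro coords x y dir hdir hturn
      obtain ⟨hL, hR, hU⟩ := hturn cmd (List.mem_cons_self ..)
      have hrest : ∀ c ∈ rest, c ≠ "L" ∧ c ≠ "R" ∧ c ≠ "U" :=
        fun c hc => hturn c (List.mem_cons_of_mem _ hc)
      simp only [List.foldl_cons, aStep, fStep]
      have hN : ¬ dir = "N" := fun h => hdir (by rw [h]; decide)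
      have hE : ¬ dir = "E" := fun h => hdir (by rw [h]; decide)
      have hS : ¬ dir = "S" := fun h => hdir (by rw [h]; decide)
      have hW : ¬ dir = "W" := fun h => hdir (by rw [h]; decide)
      by_cases hF : cmd = "F"
      · simp only [hF, if_true, reduceIte, if_neg hN, if_neg hE, if_neg hS, if_neg hW,
          show ((("F":String) = "F") = True) from by decide, add_zero]
        exact ih _ _ _ _ hdir hrest
      · simp only [if_neg hF, if_neg (show ¬(cmd = "L" ∨ cmd = "R") by simp [hL, hR]),
          if_neg hU, if_neg hL, if_neg hR]
        exact ih _ _ _ _ hdir hrest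

-- ===== VERDICT (by name: the statement is the Claim_ definition above) =====
theorem simulate_coordinates_spec : Claim_equal_simulate_coordinates := by
  intro sx sy dir cmds _ hpre
  unfold Spec_simulate_coordinates simulate_coordinates simulate_coordinates_alt
  by_cases hd : dir ∈ pyDIRECTIONS
  · rw [getD_DIR dir, if_pos hd, foldA_eq_foldF cmds [(sx, sy)] sx sy dir hd]
    have h2 := foldF_eq_scan cmds [] [(sx, sy)] sx sy (vec dir) (by simp [pysem])
    simp only [List.foldl_nil] at h2
    exact h2.symm
  · have hturn : ∀ c ∈ cmds, c ≠ "L" ∧ c ≠ "R" ∧ c ≠ "U" := hpre.resolve_left hd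
    rw [getD_DIR dir, if_neg hd, foldA_eq_foldF_invalid cmds [(sx, sy)] sx sy dir hd hturn]
    have h2 := foldF_eq_scan cmds [] [(sx, sy)] sx sy ((0 : Int), (0 : Int)) (by simp [pysem])
    simp only [List.foldl_nil] at h2
    exact h2.symm
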